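-- pv_equiv track=rewrite | github.com/benyhh/Masters-Project | models_v2.py | get_split_indices
-- ===== SOURCE A (Python) =====
-- def get_split_indices(l, n):
--     """
--     Returns a list of cumulative indices to split an array of length l into n sub-arrays.
--     The sub-arrays contain approximately the same number of rows.
--     """
--     indices = [0]
--     size = l // n
--     remainder = l % n
--     start = 0
--     for i in range(n):
--         if i < remainder:
--             end = start + size + 1
--         else:
--             end = start + size
--         indices.append(end)
--         start = end
--
--     return indices
-- ===== SOURCE B (Python) =====
-- def get_split_indices(l, n):
--     """
--     Returns a list of cumulative indices to split an array of length l into n sub-arrays.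
--     The sub-arrays contain approximately the same number of rows.
--     """
--     size = l // n
--     remainder = l % n
--     return [0] + [k * size + min(k, remainder) for k in range(1, n + 1)]
-- ===== Notes on version B (the rewrite author's own statement) =====
-- stated objective: simpler
-- what changed: Replaces the running start/end accumulator loop with the closed-form index k*size + min(k, remainder) computed independently for each k.
import Mathlib
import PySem

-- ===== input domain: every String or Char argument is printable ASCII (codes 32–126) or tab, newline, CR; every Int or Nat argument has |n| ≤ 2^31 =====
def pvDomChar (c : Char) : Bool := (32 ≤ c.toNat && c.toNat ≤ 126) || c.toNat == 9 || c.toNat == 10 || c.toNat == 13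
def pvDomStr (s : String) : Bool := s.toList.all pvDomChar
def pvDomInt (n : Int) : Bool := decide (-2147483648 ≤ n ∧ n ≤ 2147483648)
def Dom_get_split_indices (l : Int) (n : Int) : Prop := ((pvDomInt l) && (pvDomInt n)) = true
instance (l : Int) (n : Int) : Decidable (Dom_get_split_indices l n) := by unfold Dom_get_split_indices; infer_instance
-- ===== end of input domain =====

-- B replaces A's running start/end accumulator with the closed form k*size + min(k, remainder); objective: simpler.

-- ===== PORT A =====
def get_split_indices (l : Int) (n : Int) : List Int :=
  let size := PySem.Int.floordiv l n
  let remainder := PySem.Int.mod l n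
  ((PySem.List.pyRange 0 n 1).foldl
    (fun (st : List Int × Int) i =>
      let e := if i < remainder then st.2 + size + 1 else st.2 + size
      (st.1 ++ [e], e)) ([0], 0)).1

-- ===== PORT B =====
def get_split_indices_alt (l : Int) (n : Int) : List Int :=
  let size := PySem.Int.floordiv l n
  let remainder := PySem.Int.mod l n
  0 :: (PySem.List.pyRange 1 (n + 1) 1).map (fun k => k * size + min k remainder)

-- ===== PRECONDITION & SPEC =====
-- Pre_ excludes only n = 0, where Python A raises ZeroDivisionError (B raises it too).
def Pre_get_split_indices (l : Int) (n : Int) : Prop := n ≠ 0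
instance (l : Int) (n : Int) : Decidable (Pre_get_split_indices l n) := by unfold Pre_get_split_indices; infer_instance
def pvWitness_get_split_indices : Int × Int := (10, 3)

def Spec_get_split_indices (l : Int) (n : Int) (out : List Int) : Prop := out = get_split_indices_alt l n
instance (l : Int) (n : Int) (out : List Int) : Decidable (Spec_get_split_indices l n out) := by unfold Spec_get_split_indices; infer_instance

-- ===== CLAIM (what is proved, stated in full; the proofs are below) =====
def Claim_equal_get_split_indices : Prop := ∀ (l : Int) (n : Int), Dom_get_split_indices l n → Pre_get_split_indices l n → Spec_get_split_indices l n (get_split_indices l n)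

-- ===== LEMMAS AND PROOFS, then the VERDICT theorem by name =====

-- A's loop state after processing range(0, m) equals B's closed form up to m, plus the last index.
theorem pv_fold_eq (size r : Int) (hr : 0 ≤ r) (m : Nat) :
    (PySem.List.pyRange 0 (m : Int) 1).foldl
      (fun (st : List Int × Int) i =>
        let e := if i < r then st.2 + size + 1 else st.2 + size
        (st.1 ++ [e], e)) ([0], 0)
    = (0 :: (PySem.List.pyRange 1 ((m : Int) + 1) 1).map (fun k => k * size + min k r),
       (m : Int) * size + min (m : Int) r) := by
  induction m with
  | zero =>
    simp [PySem.List.pyRange_one_eq_nil (a := 0) (b := 0) le_rfl,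
          PySem.List.pyRange_one_eq_nil (a := 1) (b := 1) le_rfl]
    omega
  | succ m ih =>
    have h1 : PySem.List.pyRange 0 ((m + 1 : Nat) : Int) 1
        = PySem.List.pyRange 0 (m : Int) 1 ++ [(m : Int)] := by
      have := PySem.List.pyRange_one_succ_right (a := 0) (b := (m : Int)) (by exact_mod_cast Int.natCast_nonneg m)
      push_cast
      exact this
    have h2 : PySem.List.pyRange 1 (((m + 1 : Nat) : Int) + 1) 1
        = PySem.List.pyRange 1 ((m : Int) + 1) 1 ++ [(m : Int) + 1] := by
      have := PySem.List.pyRange_one_succ_right (a := 1) (b := (m : Int) + 1) (by omega)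
      push_cast
      push_cast at this
      exact this
    rw [h1, List.foldl_append, ih, h2]
    simp only [List.foldl_cons, List.foldl_nil, List.map_append, List.map_cons, List.map_nil,
      Prod.mk.injEq]
    have hval : (if (m : Int) < r then (m : Int) * size + min (m : Int) r + size + 1
        else (m : Int) * size + min (m : Int) r + size)
        = ((m : Int) + 1) * size + min ((m : Int) + 1) r := by
      have hs : ((m : Int) + 1) * size = (m : Int) * size + size := by ring
      by_cases h : (m : Int) < r <;> simp only [h, if_true, if_false, hs] <;> omega
    rw [hval]
    push_cast
    exact ⟨rfl, rfl⟩

theorem get_split_indices_spec : Claim_equal_get_split_indices := by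
  intro l n _ hn
  unfold Spec_get_split_indices get_split_indices get_split_indices_alt
  by_cases hpos : 0 < n
  · have hr : 0 ≤ PySem.Int.mod l n := PySem.Int.mod_nonneg (a := l) hpos
    obtain ⟨m, hm⟩ : ∃ m : Nat, n = (m : Int) := ⟨n.toNat, by omega⟩
    subst hm
    simp only []
    rw [pv_fold_eq (PySem.Int.floordiv l m) (PySem.Int.mod l m) hr m]
  · have hle : n ≤ 0 := by omega
    simp [PySem.List.pyRange_one_eq_nil (a := 0) (b := n) hle,
          PySem.List.pyRange_one_eq_nil (a := 1) (b := n + 1) (by omega)]
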